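-- pv_equiv track=rewrite | github.com/LostAsleep/aoc2021py | day01/d01.py | get_triplet_sums
-- ===== SOURCE A (Python) =====
-- def get_triplet_sums(numbers:list) -> list:
--     """Tries to create triplets from a list of ints
--     and returns a list of their sums."""
--
--     triples = []
--     index = 0
--     while True:
--         try:
--             trip = (numbers[index], numbers[index+1], numbers[index+2])
--             trip = sum(trip)
--             triples.append(trip)
--             index += 1
--         except IndexError:
--             break
--     return triples
-- ===== SOURCE B (Python) =====
-- def get_triplet_sums(numbers: list) -> list:
--     """Sliding-window re-implementation: keep a running 3-window sum
--     instead of re-summing a fresh triple at each index."""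
--     if len(numbers) < 3:
--         return []
--     w = numbers[0] + numbers[1] + numbers[2]
--     result = [w]
--     for x_in, x_out in zip(numbers[3:], numbers):
--         w += x_in - x_out
--         result.append(w)
--     return result
-- ===== Notes on version B (the rewrite author's own statement) =====
-- stated objective: faster
-- what changed: Replaced A's try/except index-probing while-loop that re-sums a fresh 3-tuple at every index with a length guard plus a running sliding-window sum updated by one add/subtract per zipped (incoming, outgoing) pair.
import Mathlib
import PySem

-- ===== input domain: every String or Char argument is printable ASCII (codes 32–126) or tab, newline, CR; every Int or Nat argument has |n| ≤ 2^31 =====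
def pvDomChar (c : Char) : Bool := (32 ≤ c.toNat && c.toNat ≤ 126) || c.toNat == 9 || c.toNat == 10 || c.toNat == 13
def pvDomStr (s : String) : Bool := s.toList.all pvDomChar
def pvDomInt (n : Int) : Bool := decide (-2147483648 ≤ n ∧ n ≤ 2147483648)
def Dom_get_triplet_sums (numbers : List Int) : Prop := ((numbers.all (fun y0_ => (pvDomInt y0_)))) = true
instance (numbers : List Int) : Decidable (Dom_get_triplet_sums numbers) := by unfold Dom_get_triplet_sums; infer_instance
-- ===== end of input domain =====

-- B replaces A's index-crawling try/except loop by a running 3-window sum (one add/sub per step); same return value on all inputs.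

-- ===== PORT A =====
-- A's `while True` loop: read numbers[index], numbers[index+1], numbers[index+2];
-- on IndexError (any pyGet? = none) break, else append the sum and continue.
def gtsLoopA (numbers : List Int) (index : Nat) (triples : List Int) : List Int :=
  match PySem.List.pyGet? numbers (index : Int), PySem.List.pyGet? numbers ((index : Int) + 1),
        h : PySem.List.pyGet? numbers ((index : Int) + 2) with
  | some a, some b, some c => gtsLoopA numbers (index + 1) (triples ++ [a + b + c])
  | _, _, _ => triples
termination_by numbers.length - index
decreasing_by
  rw [PySem.List.pyGet?_of_nonneg numbers (by positivity),
      show ((index : Int) + 2).toNat = index + 2 by omega] at h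
  obtain ⟨hlt, -⟩ := List.getElem?_eq_some_iff.mp h
  omega

def get_triplet_sums (numbers : List Int) : List Int :=
  gtsLoopA numbers 0 []

-- ===== PORT B =====
-- B's body: guard len < 3, seed the window with the first triple, then for
-- (x_in, x_out) in zip(numbers[3:], numbers) slide the window and append.
def get_triplet_sums_alt (numbers : List Int) : List Int :=
  if numbers.length < 3 then []
  else
    match numbers with
    | n0 :: n1 :: n2 :: _ =>
      let w := n0 + n1 + n2
      let st := (List.zip (PySem.List.slice numbers (some 3) none) numbers).foldl
        (fun (s : Int × List Int) p => ((s.1 + p.1) - p.2, s.2 ++ [(s.1 + p.1) - p.2])) (w, [w])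
      st.2
    | _ => []

-- ===== PRECONDITION & SPEC =====
def Spec_get_triplet_sums (numbers : List Int) (out : List Int) : Prop := out = get_triplet_sums_alt numbers
instance (numbers : List Int) (out : List Int) : Decidable (Spec_get_triplet_sums numbers out) := by unfold Spec_get_triplet_sums; infer_instance

-- ===== CLAIM (what is proved, stated in full; the proofs are below) =====
def Claim_equal_get_triplet_sums : Prop := ∀ (numbers : List Int), Dom_get_triplet_sums numbers → Spec_get_triplet_sums numbers (get_triplet_sums numbers)

-- ===== LEMMAS AND PROOFS =====

-- reference triplet sums, used only by the proofs
def tripS : List Int → List Int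
  | a :: b :: c :: rest => (a + b + c) :: tripS (b :: c :: rest)
  | _ => []

lemma tripS_short {xs : List Int} (h : xs.length < 3) : tripS xs = [] := by
  match xs, h with
  | [], _ => rfl
  | [_], _ => rfl
  | [_, _], _ => rfl

lemma pyGet3 (xs : List Int) (n : Nat) (j : Int) (hj : j = (n : Int)) :
    PySem.List.pyGet? xs j = xs[n]? := by
  subst hj; exact PySem.List.pyGet?_natCast xs n

lemma gtsLoopA_eq (numbers : List Int) (index : Nat) (triples : List Int) :
    gtsLoopA numbers index triples = triples ++ tripS (numbers.drop index) := by
  fun_induction gtsLoopA numbers index triples with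
  | case1 index triples a b c h2p h1p h0p ih =>
    rw [pyGet3 numbers index _ rfl] at h0p
    rw [pyGet3 numbers (index + 1) _ (by push_cast; ring)] at h1p
    rw [pyGet3 numbers (index + 2) _ (by push_cast; ring)] at h2p
    obtain ⟨g0, e0⟩ := List.getElem?_eq_some_iff.mp h0p
    obtain ⟨g1, e1⟩ := List.getElem?_eq_some_iff.mp h1p
    obtain ⟨g2, e2⟩ := List.getElem?_eq_some_iff.mp h2p
    have d0 : numbers.drop index = a :: numbers.drop (index + 1) := by
      rw [List.drop_eq_getElem_cons g0, e0]
    have d1 : numbers.drop (index + 1) = b :: numbers.drop (index + 2) := by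
      rw [List.drop_eq_getElem_cons g1, e1]
    have d2 : numbers.drop (index + 2) = c :: numbers.drop (index + 3) := by
      rw [List.drop_eq_getElem_cons g2, e2]
    rw [ih, d0, d1, d2]
    simp [tripS]
  | case2 index triples hnotall =>
    have hlen : numbers.length < index + 3 := by
      by_contra hge
      exact hnotall numbers[index] numbers[index + 1] numbers[index + 2]
        (by rw [pyGet3 numbers index _ rfl]; exact List.getElem?_eq_getElem (by omega))
        (by rw [pyGet3 numbers (index + 1) _ (by push_cast; ring)]
            exact List.getElem?_eq_getElem (by omega))
        (by rw [pyGet3 numbers (index + 2) _ (by push_cast; ring)]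
            exact List.getElem?_eq_getElem (by omega))
    rw [tripS_short (by simp; omega)]
    simp

lemma foldB (xs : List Int) (a b c : Int) (res : List Int) :
    ((List.zip ((a :: b :: c :: xs).drop 3) (a :: b :: c :: xs)).foldl
      (fun (s : Int × List Int) p => ((s.1 + p.1) - p.2, s.2 ++ [(s.1 + p.1) - p.2]))
      (a + b + c, res ++ [a + b + c])).2 = res ++ tripS (a :: b :: c :: xs) := by
  induction xs generalizing a b c res with
  | nil => simp [tripS]
  | cons d xs' ih =>
    have step : ((a :: b :: c :: d :: xs').drop 3) = d :: xs' := rfl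
    rw [step]
    show ((List.zip xs' (b :: c :: d :: xs')).foldl _
      (((a + b + c) + d) - a, (res ++ [a + b + c]) ++ [((a + b + c) + d) - a])).2 = _
    have hw : ((a + b + c) + d) - a = b + c + d := by ring
    rw [hw, show (List.zip xs' (b :: c :: d :: xs')) =
      (List.zip ((b :: c :: d :: xs').drop 3) (b :: c :: d :: xs')) from rfl,
      ih b c d (res ++ [a + b + c])]
    simp [tripS]

lemma eq_all (numbers : List Int) : get_triplet_sums numbers = get_triplet_sums_alt numbers := by
  have hA : get_triplet_sums numbers = tripS numbers := by
    rw [get_triplet_sums, gtsLoopA_eq]; simp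
  rw [hA]
  match numbers with
  | [] => rfl
  | [_] => rfl
  | [_, _] => rfl
  | a :: b :: c :: rest =>
    have hslice : PySem.List.slice (a :: b :: c :: rest) (some 3) none = rest := by
      rw [PySem.List.slice_from _ (by norm_num)]; rfl
    show tripS (a :: b :: c :: rest) = get_triplet_sums_alt (a :: b :: c :: rest)
    rw [get_triplet_sums_alt, if_neg (by simp)]
    simp only [hslice]
    have := foldB rest a b c []
    rw [show ((a :: b :: c :: rest).drop 3) = rest from rfl] at this
    rw [show ([] : List Int) ++ [a + b + c] = [a + b + c] from rfl] at this
    simpa using this.symm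

-- ===== VERDICT (by name: the statement is the Claim_ definition above) =====
theorem get_triplet_sums_spec : Claim_equal_get_triplet_sums := by
  intro numbers _
  unfold Spec_get_triplet_sums
  exact eq_all numbers
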